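-- pv_equiv track=rewrite | github.com/sjsfwch/Assignment | LogparserForVisualization.py | divideGroupByDis
-- ===== SOURCE A (Python) =====
-- def mergeLogToParamList(log,paramList,count=1):
--     if not paramList:
--         for i in range(len(log)):
--             paramList.append({log[i]:count})
--     else:
--         for i in range(len(log)):
--             if log[i] in paramList[i].keys():
--                 paramList[i][log[i]]+=count
--             else:
--                 paramList[i][log[i]]=count
--     return paramList
--
-- def countVecDis(vec1,vec2):
--     dis=""
--     #优化可以用字节表示一位
--     for i in range(len(vec1)):
--         if vec1[i]==vec2[i]:
--             dis+='0'
--         else: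
--             dis+='1'
--     return dis
--
-- def divideGroupByDis(stdLog,group):
--     subGroup,logDict={},{}
--     for log in group:
--         dis=countVecDis(stdLog,log)
--         if dis not in subGroup.keys():
--             logDict[dis]=[log]
--             subGroup[dis]=mergeLogToParamList(log,[])
--         else:
--             logDict[dis].append(log)
--             subGroup[dis]=mergeLogToParamList(log,subGroup[dis])
--     return subGroup,logDict
-- ===== SOURCE B (Python) =====
-- def divideGroupByDis(stdLog, group):
--     # partition-then-aggregate: first bucket the logs by diff-string, then
--     # build each bucket's paramList by folding its logs in original order
--     logDict = {}
--     for log in group: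
--         dis = ''.join('0' if stdLog[i] == log[i] else '1' for i in range(len(stdLog)))
--         logDict.setdefault(dis, []).append(log)
--     subGroup = {}
--     for dis, logs in logDict.items():
--         paramList = []
--         for log in logs:
--             if not paramList:
--                 paramList = [{v: 1} for v in log]
--             else:
--                 for i, v in enumerate(log):
--                     d = paramList[i]
--                     d[v] = d.get(v, 0) + 1
--         subGroup[dis] = paramList
--     return subGroup, logDict
-- ===== Notes on version B (the rewrite author's own statement) =====
-- stated objective: alternative
-- what changed: Replaces A's single interleaved loop (which updates subGroup and logDict together, re-merging into subGroup[dis] at every log) by a partition-then-aggregate decomposition: one pass buckets the logs by diff-string into logDict, then a second pass folds each bucket's logs, in their original order, into that bucket's paramList.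
import Mathlib
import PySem

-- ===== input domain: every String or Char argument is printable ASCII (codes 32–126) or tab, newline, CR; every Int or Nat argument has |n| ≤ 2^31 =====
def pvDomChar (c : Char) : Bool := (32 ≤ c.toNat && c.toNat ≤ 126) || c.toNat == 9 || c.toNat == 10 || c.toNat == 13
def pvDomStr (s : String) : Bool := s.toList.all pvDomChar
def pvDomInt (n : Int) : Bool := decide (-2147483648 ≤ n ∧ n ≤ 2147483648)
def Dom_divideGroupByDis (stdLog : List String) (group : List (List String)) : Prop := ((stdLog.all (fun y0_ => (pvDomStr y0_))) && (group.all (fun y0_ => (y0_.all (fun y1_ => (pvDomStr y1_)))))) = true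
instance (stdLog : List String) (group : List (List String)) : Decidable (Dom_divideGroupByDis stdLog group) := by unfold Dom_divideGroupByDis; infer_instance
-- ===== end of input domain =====

-- B replaces A's single interleaved loop by a partition-then-aggregate decomposition
-- (bucket logs by diff-string first, then fold each bucket into its paramList);
-- equivalence is about return values (A mutates its paramList/logDict entries in place).

-- ===== PORT A =====

-- countVecDis(vec1, vec2): vec2[i] out of range is an IndexError in Python (pyGet? = none,
-- rendered '1' here; such inputs are excluded by Pre_).
def countVecDisA (vec1 vec2 : List String) : String :=
  (List.range vec1.length).foldl
    (fun dis (i : Nat) =>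
      dis ++ (if PySem.List.pyGet? vec2 (i : Int) == some (vec1.getD i "") then "0" else "1"))
    ""

-- mergeLogToParamList(log, paramList, count): paramList[i] out of range is an IndexError in
-- Python (here getD/set leave the list unchanged; such inputs are excluded by Pre_).
def mergeLogToParamList (log : List String) (paramList : List (PySem.Dict String Int))
    (count : Int) : List (PySem.Dict String Int) :=
  if paramList = [] then
    (List.range log.length).foldl
      (fun pl i => pl ++ [PySem.Dict.empty.insert (log.getD i "") count]) []
  else
    (List.range log.length).foldl
      (fun pl i =>
        let v := log.getD i ""
        let d := pl.getD i PySem.Dict.empty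
        pl.set i (if d.contains v then d.insert v (d.getD v 0 + count) else d.insert v count))
      paramList

def divideGroupByDis (stdLog : List String) (group : List (List String)) :
    (List (String × List (List (String × Int)))) × (List (String × List (List String))) :=
  let st :=
    group.foldl
      (fun (st : PySem.Dict String (List (PySem.Dict String Int)) ×
                 PySem.Dict String (List (List String))) log =>
        let sg := st.1
        let ld := st.2
        let dis := countVecDisA stdLog log
        if sg.contains dis = false then
          (sg.insert dis (mergeLogToParamList log [] 1), ld.insert dis [log])
        else
          (sg.insert dis (mergeLogToParamList log (sg.getD dis []) 1),
           ld.modify dis [] (· ++ [log])))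
      (PySem.Dict.empty, PySem.Dict.empty)
  (st.1.items.map (fun p => (p.1, p.2.map PySem.Dict.items)), st.2.items)

-- ===== PORT B =====

-- ''.join('0' if stdLog[i] == log[i] else '1' for i in range(len(stdLog)))
def countVecDisB (stdLog log : List String) : String :=
  PySem.Str.join ""
    ((List.range stdLog.length).map
      (fun (i : Nat) => if PySem.List.pyGet? log (i : Int) == some (stdLog.getD i "") then "0" else "1"))

-- body of B's aggregation loop over one bucket's logs ("for log in logs: …");
-- paramList[i] out of range is an IndexError in Python (excluded by Pre_)
def mergeStep (pl : List (PySem.Dict String Int)) (log : List String) :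
    List (PySem.Dict String Int) :=
  if pl = [] then log.map (fun v => PySem.Dict.empty.insert v 1)
  else
    (PySem.List.enumerate log).foldl
      (fun pl p =>
        let d := pl.getD p.1.toNat PySem.Dict.empty   -- enumerate indices are ≥ 0, toNat exact
        pl.set p.1.toNat (d.insert p.2 (d.getD p.2 0 + 1)))
      pl

def bucketParamList (logs : List (List String)) : List (PySem.Dict String Int) :=
  logs.foldl mergeStep []

def divideGroupByDis_alt (stdLog : List String) (group : List (List String)) :
    (List (String × List (List (String × Int)))) × (List (String × List (List String))) :=
  -- pass 1: logDict.setdefault(dis, []).append(log)  ≡  logDict[dis] = logDict.get(dis, []) + [log]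
  let ld := group.foldl
      (fun (ld : PySem.Dict String (List (List String))) log =>
        ld.modify (countVecDisB stdLog log) [] (· ++ [log]))
      PySem.Dict.empty
  -- pass 2: for dis, logs in logDict.items(): subGroup[dis] = fold of the bucket
  let sg := ld.items.foldl
      (fun (sg : PySem.Dict String (List (PySem.Dict String Int))) p =>
        sg.insert p.1 (bucketParamList p.2))
      PySem.Dict.empty
  (sg.items.map (fun p => (p.1, p.2.map PySem.Dict.items)), ld.items)

-- ===== PRECONDITION & SPEC =====

-- which positions of log agree with stdLog (the information in the diff-string)
def patRow (stdLog log : List String) : List Bool :=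
  (List.range stdLog.length).map (fun k => stdLog.getD k "" == log.getD k "")

-- Pre_ excludes exactly the inputs on which Python A raises IndexError: a log shorter than
-- stdLog (in countVecDis), or a log longer than the first nonempty log of its diff-string
-- bucket (in mergeLogToParamList).  A returns on every input admitted here.
def preCheck (stdLog : List String) (group : List (List String)) : Bool :=
  group.all (fun log => decide (stdLog.length ≤ log.length)) &&
  ((List.range group.length).all fun i =>
    (List.range group.length).all fun j =>
      !(decide (i < j) &&
        (patRow stdLog (group.getD i []) == patRow stdLog (group.getD j [])) &&
        !(group.getD i []).isEmpty &&
        ((List.range i).all fun m =>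
          !((patRow stdLog (group.getD m []) == patRow stdLog (group.getD i [])) &&
            !(group.getD m []).isEmpty))) ||
      decide ((group.getD j []).length ≤ (group.getD i []).length))

def Pre_divideGroupByDis (stdLog : List String) (group : List (List String)) : Prop :=
  preCheck stdLog group = true

instance (stdLog : List String) (group : List (List String)) :
    Decidable (Pre_divideGroupByDis stdLog group) := by
  unfold Pre_divideGroupByDis; infer_instance

def pvWitness_divideGroupByDis : List String × List (List String) :=
  (["a", "b"], [["a", "b"], ["a", "c"], ["b", "b"], ["a", "c"]])

def Spec_divideGroupByDis (stdLog : List String) (group : List (List String))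
    (out : (List (String × List (List (String × Int)))) × (List (String × List (List String)))) :
    Prop := out = divideGroupByDis_alt stdLog group

instance (stdLog : List String) (group : List (List String))
    (out : (List (String × List (List (String × Int)))) × (List (String × List (List String)))) :
    Decidable (Spec_divideGroupByDis stdLog group out) := by
  unfold Spec_divideGroupByDis; infer_instance

-- ===== CLAIM (what is proved, stated in full; the proofs are below) =====
def Claim_equal_divideGroupByDis : Prop := ∀ (stdLog : List String) (group : List (List String)), Dom_divideGroupByDis stdLog group → Pre_divideGroupByDis stdLog group → Spec_divideGroupByDis stdLog group (divideGroupByDis stdLog group)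

-- ===== LEMMAS AND PROOFS =====

theorem join_empty_nil : PySem.Str.join "" ([] : List String) = "" := by
  rw [← String.toList_inj]; simp [PySem.Str.toList_join, PySem.Chars.join_nil]

theorem join_empty_cons (x : String) (xs : List String) :
    PySem.Str.join "" (x :: xs) = x ++ PySem.Str.join "" xs := by
  rw [← String.toList_inj, String.toList_append, PySem.Str.toList_join, PySem.Str.toList_join]
  cases xs with
  | nil => simp [PySem.Chars.join_singleton, PySem.Chars.join_nil]
  | cons y ys => simp [PySem.Chars.join_cons_cons]

theorem foldl_append_join {α : Type} (f : α → String) :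
    ∀ (l : List α) (acc : String),
      l.foldl (fun s x => s ++ f x) acc = acc ++ PySem.Str.join "" (l.map f)
  | [], acc => by simp [join_empty_nil]
  | x :: t, acc => by
    simp only [List.foldl_cons, List.map_cons, join_empty_cons]
    rw [foldl_append_join f t (acc ++ f x), String.append_assoc]

theorem cvd_eq (stdLog log : List String) :
    countVecDisB stdLog log = countVecDisA stdLog log := by
  unfold countVecDisA countVecDisB
  rw [foldl_append_join
    (fun (i : Nat) => if PySem.List.pyGet? log (i : Int) == some (stdLog.getD i "") then "0" else "1")]
  simp

theorem map_range_getD' {α β : Type} (f : α → β) (d : α) :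
    ∀ (xs : List α), (List.range xs.length).map (fun i => f (xs.getD i d)) = xs.map f
  | [] => rfl
  | x :: t => by
    simp only [List.length_cons, List.range_succ_eq_map, List.map_cons, List.map_map,
      List.getD_cons_zero, Function.comp_def, List.getD_cons_succ]
    rw [map_range_getD' f d t]

theorem enum_range (log : List String) :
    ∀ (s : Nat) (pl : List (PySem.Dict String Int)),
      (PySem.List.enumerate log (s : Int)).foldl
        (fun pl p =>
          pl.set p.1.toNat
            ((pl.getD p.1.toNat PySem.Dict.empty).insert p.2
              ((pl.getD p.1.toNat PySem.Dict.empty).getD p.2 0 + 1))) pl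
      = (List.range log.length).foldl
          (fun pl i =>
            pl.set (s + i)
              ((pl.getD (s + i) PySem.Dict.empty).insert (log.getD i "")
                ((pl.getD (s + i) PySem.Dict.empty).getD (log.getD i "") 0 + 1))) pl := by
  induction log with
  | nil => intro s pl; rfl
  | cons x t ih =>
    intro s pl
    rw [PySem.List.enumerate_cons]
    simp only [List.foldl_cons, List.length_cons, List.range_succ_eq_map, List.foldl_map]
    have hs : ((s : Int) + 1) = ((s + 1 : Nat) : Int) := by push_cast; ring
    rw [hs, ih (s + 1)]
    simp only [Int.toNat_natCast, List.getD_cons_zero, Nat.add_zero]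
    have hfun :
        (fun (pl : List (PySem.Dict String Int)) (i : Nat) =>
          pl.set (s + 1 + i)
            ((pl.getD (s + 1 + i) PySem.Dict.empty).insert (t.getD i "")
              ((pl.getD (s + 1 + i) PySem.Dict.empty).getD (t.getD i "") 0 + 1)))
        = (fun (pl : List (PySem.Dict String Int)) (i : Nat) =>
          pl.set (s + i.succ)
            ((pl.getD (s + i.succ) PySem.Dict.empty).insert ((x :: t).getD i.succ "")
              ((pl.getD (s + i.succ) PySem.Dict.empty).getD ((x :: t).getD i.succ "") 0 + 1))) := by
      funext pl i
      simp only [List.getD_cons_succ, Nat.succ_eq_add_one]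
      have h1 : s + 1 + i = s + (i + 1) := by omega
      rw [h1]
    rw [hfun]

theorem merge_eq (log : List String) (pl : List (PySem.Dict String Int)) :
    mergeLogToParamList log pl 1 = mergeStep pl log := by
  cases pl with
  | nil =>
    unfold mergeLogToParamList mergeStep
    simp only [reduceIte]
    rw [PySem.List.foldl_append_singleton_eq_map
      (fun i => PySem.Dict.empty.insert (log.getD i "") (1 : Int)) (List.range log.length) []]
    simp only [List.nil_append]
    exact map_range_getD' (fun v => PySem.Dict.empty.insert v (1 : Int)) "" log
  | cons d0 pl0 =>
    unfold mergeLogToParamList mergeStep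
    simp only [reduceCtorEq, if_false]
    have he := enum_range log 0 (d0 :: pl0)
    simp only [Nat.cast_zero] at he
    have hfun :
        (fun (pl : List (PySem.Dict String Int)) (i : Nat) =>
          pl.set (0 + i)
            ((pl.getD (0 + i) PySem.Dict.empty).insert (log.getD i "")
              ((pl.getD (0 + i) PySem.Dict.empty).getD (log.getD i "") 0 + 1)))
        = (fun (pl : List (PySem.Dict String Int)) (i : Nat) =>
          pl.set i
            (if (pl.getD i PySem.Dict.empty).contains (log.getD i "") = true then
              (pl.getD i PySem.Dict.empty).insert (log.getD i "")
                ((pl.getD i PySem.Dict.empty).getD (log.getD i "") 0 + 1)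
            else (pl.getD i PySem.Dict.empty).insert (log.getD i "") 1)) := by
      funext pl i
      simp only [Nat.zero_add]
      by_cases hc : (pl.getD i PySem.Dict.empty).contains (log.getD i "") = true
      · rw [if_pos hc]
      · rw [if_neg hc,
          PySem.Dict.getD_of_not_contains (pl.getD i PySem.Dict.empty) 0 (by simpa using hc)]
        norm_num
    rw [he, hfun]

theorem bucket_append (logs : List (List String)) (log : List String) :
    bucketParamList (logs ++ [log]) = mergeStep (bucketParamList logs) log := by
  simp [bucketParamList, List.foldl_append]

theorem main_inv (stdLog : List String) :
    ∀ (gs : List (List String)) (sg : PySem.Dict String (List (PySem.Dict String Int)))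
      (ld : PySem.Dict String (List (List String))),
      sg.items = ld.items.map (fun p => (p.1, bucketParamList p.2)) →
      ld.keys.Nodup →
      (gs.foldl
        (fun (st : PySem.Dict String (List (PySem.Dict String Int)) ×
                   PySem.Dict String (List (List String))) log =>
          let sg := st.1
          let ld := st.2
          let dis := countVecDisA stdLog log
          if sg.contains dis = false then
            (sg.insert dis (mergeLogToParamList log [] 1), ld.insert dis [log])
          else
            (sg.insert dis (mergeLogToParamList log (sg.getD dis []) 1),
             ld.modify dis [] (· ++ [log])))
        (sg, ld)
       = (PySem.Dict.mk
            ((gs.foldl (fun ld log => ld.modify (countVecDisA stdLog log) [] (· ++ [log])) ld).items.map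
              (fun p => (p.1, bucketParamList p.2))),
          gs.foldl (fun ld log => ld.modify (countVecDisA stdLog log) [] (· ++ [log])) ld))
      ∧ (gs.foldl (fun ld log => ld.modify (countVecDisA stdLog log) [] (· ++ [log])) ld).keys.Nodup := by
  intro gs
  induction gs with
  | nil =>
    intro sg ld h hnd
    refine ⟨?_, hnd⟩
    simp only [List.foldl_nil]
    exact Prod.ext (PySem.Dict.ext (by simpa using h)) rfl
  | cons log gs ih =>
    intro sg ld h hnd
    simp only [List.foldl_cons]
    have hkeys : sg.keys = ld.keys := by
      simp only [PySem.Dict.keys, h, List.map_map]; rfl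
    have hcont : sg.contains (countVecDisA stdLog log) = ld.contains (countVecDisA stdLog log) := by
      rw [PySem.Dict.contains_eq_decide_mem_keys, PySem.Dict.contains_eq_decide_mem_keys, hkeys]
    cases hc : sg.contains (countVecDisA stdLog log) with
    | false =>
      have hldc : ld.contains (countVecDisA stdLog log) = false := by rw [← hcont, hc]
      have hmod : ld.modify (countVecDisA stdLog log) [] (· ++ [log])
          = ld.insert (countVecDisA stdLog log) [log] := by
        simp [PySem.Dict.modify, PySem.Dict.getD_of_not_contains ld ([] : List (List String)) hldc]
      simp only [hmod]
      apply ih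
      · rw [PySem.Dict.items_insert_of_not_contains _ _ hc,
          PySem.Dict.items_insert_of_not_contains _ _ hldc, List.map_append, h]
        simp [merge_eq, bucketParamList]
      · rw [PySem.Dict.keys_insert_of_not_contains _ _ hldc]
        have : (countVecDisA stdLog log) ∉ ld.keys := by
          rw [PySem.Dict.contains_eq_decide_mem_keys] at hldc
          simpa using hldc
        exact List.Nodup.append hnd (List.nodup_singleton _) (by simpa using this)
    | true =>
      have hldc : ld.contains (countVecDisA stdLog log) = true := by rw [← hcont, hc]
      have hkmem : (countVecDisA stdLog log) ∈ ld.keys := by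
        rw [PySem.Dict.contains_eq_decide_mem_keys] at hldc
        simpa using hldc
      rw [PySem.Dict.keys] at hkmem
      obtain ⟨p, hp, hpk⟩ := List.mem_map.mp hkmem
      have hmem : (countVecDisA stdLog log, p.2) ∈ ld.items := by
        have : p = (countVecDisA stdLog log, p.2) := by
          cases p; simp at hpk ⊢; exact hpk
        rw [← this]; exact hp
      have hgetld : ld.getD (countVecDisA stdLog log) [] = p.2 :=
        PySem.Dict.getD_of_mem_items ld hmem hnd []
      have hsgnd : sg.keys.Nodup := by rw [hkeys]; exact hnd
      have hmemF : (countVecDisA stdLog log, bucketParamList p.2) ∈ sg.items := by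
        rw [h]
        exact List.mem_map.mpr ⟨(countVecDisA stdLog log, p.2), hmem, rfl⟩
      have hgetsg : sg.getD (countVecDisA stdLog log) [] = bucketParamList p.2 :=
        PySem.Dict.getD_of_mem_items sg hmemF hsgnd []
      have hmod : ld.modify (countVecDisA stdLog log) [] (· ++ [log])
          = ld.insert (countVecDisA stdLog log) (p.2 ++ [log]) := by
        simp [PySem.Dict.modify, hgetld]
      simp only [Bool.true_eq_false, if_false, hmod]

      apply ih
      · rw [PySem.Dict.items_insert_of_contains _ _ hc,
          PySem.Dict.items_insert_of_contains _ _ hldc, h, List.map_map, List.map_map]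
        apply List.map_congr_left
        intro q hq
        by_cases hqk : q.1 = countVecDisA stdLog log
        · have hq2 : q.2 = p.2 := by
            have hqmem : (countVecDisA stdLog log, q.2) ∈ ld.items := by
              have : q = (countVecDisA stdLog log, q.2) := by
                cases q; simp at hqk ⊢; exact hqk
              rw [← this]; exact hq
            have := PySem.Dict.getD_of_mem_items ld hqmem hnd []
            rw [hgetld] at this; exact this.symm
          simp only [Function.comp_def, hqk, hq2, beq_self_eq_true, if_pos]
          rw [merge_eq, hgetsg, ← bucket_append]
        · have : (q.1 == countVecDisA stdLog log) = false := by simpa using hqk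
          simp only [Function.comp_def, this, Bool.false_eq_true, if_false]
      · rw [PySem.Dict.keys_insert_of_contains _ _ hldc]
        exact hnd

-- ===== VERDICT (by name: the statement is the Claim_ definition above) =====
theorem divideGroupByDis_spec : Claim_equal_divideGroupByDis := by
  intro stdLog group _ _
  unfold Spec_divideGroupByDis divideGroupByDis divideGroupByDis_alt
  simp only [cvd_eq]
  obtain ⟨heq, hnd⟩ := main_inv stdLog group PySem.Dict.empty PySem.Dict.empty rfl List.nodup_nil
  rw [heq]
  have hfresh := PySem.Dict.items_foldl_insert_fresh
    ((group.foldl (fun ld log => ld.modify (countVecDisA stdLog log) [] (· ++ [log]))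
        PySem.Dict.empty).items)
    (fun p => p.1) (fun p => bucketParamList p.2) PySem.Dict.empty
    (fun a _ => PySem.Dict.contains_empty a.1)
    (by simpa [PySem.Dict.keys] using hnd)
  simp only [hfresh]
  rfl
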